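-- pv_equiv track=rewrite | github.com/gali1998/ExtendedIntroToCSHomework | 5/reference.py | prefix_suffix_overlap
-- ===== SOURCE A (Python) =====
-- def prefix_suffix_overlap(lst, k):
--     res = []
--     for i in range(0, len(lst)):
--         prefix = lst[i][0:k]
--         for j in range(0, len(lst)):
--             suffix = lst[j][-k:]
--             if prefix == suffix and i != j:
--                 res.append((i, j))
--     return res
-- ===== SOURCE B (Python) =====
-- def prefix_suffix_overlap(lst, k):
--     by_suffix = {}
--     for j, s in enumerate(lst):
--         key = s[-k:]
--         by_suffix[key] = by_suffix.get(key, []) + [j]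
--     res = []
--     for i, s in enumerate(lst):
--         for j in by_suffix.get(s[0:k], []):
--             if i != j:
--                 res.append((i, j))
--     return res
-- ===== Notes on version B (the rewrite author's own statement) =====
-- stated objective: alternative
-- what changed: Replaced the quadratic all-pairs slice-and-compare scan by a one-pass dict grouping suffix -> ascending index list, then a single lookup of each prefix.
import Mathlib
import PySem

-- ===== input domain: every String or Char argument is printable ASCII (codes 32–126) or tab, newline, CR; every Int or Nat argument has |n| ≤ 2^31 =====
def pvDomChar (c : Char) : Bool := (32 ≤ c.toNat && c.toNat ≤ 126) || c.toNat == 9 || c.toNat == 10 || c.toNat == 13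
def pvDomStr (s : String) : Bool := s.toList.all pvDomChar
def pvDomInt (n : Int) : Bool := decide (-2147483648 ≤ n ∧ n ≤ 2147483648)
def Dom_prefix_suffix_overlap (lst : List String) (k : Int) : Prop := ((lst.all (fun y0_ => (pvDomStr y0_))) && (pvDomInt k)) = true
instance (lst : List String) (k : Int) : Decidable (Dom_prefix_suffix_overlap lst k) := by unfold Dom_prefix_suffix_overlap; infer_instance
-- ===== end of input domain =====

-- B replaces A's all-pairs scan by a dict grouping suffix -> ascending index list (a different algorithm; cost depends on output size).

-- ===== PORT A =====
def prefix_suffix_overlap (lst : List String) (k : Int) : List (Int × Int) :=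
  (PySem.List.pyRange 0 (PySem.List.len lst) 1).foldl (fun res i =>
    (PySem.List.pyRange 0 (PySem.List.len lst) 1).foldl (fun res j =>
      if PySem.Str.slice (PySem.List.pyGetD lst i "") (some 0) (some k)
           = PySem.Str.slice (PySem.List.pyGetD lst j "") (some (-k)) none ∧ i ≠ j
      then res ++ [(i, j)] else res) res) []

-- ===== PORT B =====
def prefix_suffix_overlap_alt (lst : List String) (k : Int) : List (Int × Int) :=
  let bySuffix : PySem.Dict String (List Int) :=
    (PySem.List.enumerate lst 0).foldl
      (fun d p =>
        d.insert (PySem.Str.slice p.2 (some (-k)) none)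
          (d.getD (PySem.Str.slice p.2 (some (-k)) none) [] ++ [p.1]))
      PySem.Dict.empty
  (PySem.List.enumerate lst 0).foldl (fun res p =>
    (bySuffix.getD (PySem.Str.slice p.2 (some 0) (some k)) []).foldl
      (fun res j => if p.1 ≠ j then res ++ [(p.1, j)] else res) res) []

-- ===== PRECONDITION & SPEC =====
def Spec_prefix_suffix_overlap (lst : List String) (k : Int) (out : List (Int × Int)) : Prop := out = prefix_suffix_overlap_alt lst k
instance (lst : List String) (k : Int) (out : List (Int × Int)) : Decidable (Spec_prefix_suffix_overlap lst k out) := by unfold Spec_prefix_suffix_overlap; infer_instance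

-- ===== CLAIM (what is proved, stated in full; the proofs are below) =====
def Claim_equal_prefix_suffix_overlap : Prop := ∀ (lst : List String) (k : Int), Dom_prefix_suffix_overlap lst k → Spec_prefix_suffix_overlap lst k (prefix_suffix_overlap lst k)

-- ===== LEMMAS AND PROOFS =====

-- the grouping invariant: looking up a key in the built dict gives the indices whose suffix is that key, in order
theorem pso_dict_getD (k : Int) (ps : List (Int × String)) (d : PySem.Dict String (List Int)) (key : String) :
    (ps.foldl (fun d p =>
        d.insert (PySem.Str.slice p.2 (some (-k)) none)
          (d.getD (PySem.Str.slice p.2 (some (-k)) none) [] ++ [p.1])) d).getD key []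
    = d.getD key [] ++ (ps.filter (fun p => PySem.Str.slice p.2 (some (-k)) none == key)).map (·.1) := by
  induction ps generalizing d with
  | nil => simp
  | cons p t ih =>
    simp only [List.foldl_cons, List.filter_cons]
    rw [ih]
    by_cases h : PySem.Str.slice p.2 (some (-k)) none = key
    · simp [h, PySem.Dict.getD_insert_self]
    · simp [h, PySem.Dict.getD_insert, Ne.symm h]

-- ===== VERDICT (by name: the statement is the Claim_ definition above) =====
theorem prefix_suffix_overlap_spec : Claim_equal_prefix_suffix_overlap := by
  intro lst k _
  show prefix_suffix_overlap lst k = prefix_suffix_overlap_alt lst k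
  unfold prefix_suffix_overlap prefix_suffix_overlap_alt
  simp only [pso_dict_getD, PySem.Dict.getD_empty, List.nil_append]
  rw [PySem.List.enumerate_eq_map_pyRange lst ""]
  rw [List.foldl_map]
  apply PySem.List.foldl_congr_mem
  intro res p _
  simp only
  rw [PySem.List.foldl_append_ite
        (fun j => PySem.Str.slice (PySem.List.pyGetD lst p "") (some 0) (some k)
            = PySem.Str.slice (PySem.List.pyGetD lst j "") (some (-k)) none ∧ p ≠ j)
        (fun j => ((p : Int), j))]
  rw [PySem.List.foldl_append_ite (fun j => (p : Int) ≠ j) (fun j => ((p : Int), j))]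
  congr 1
  simp only [List.filter_map, List.map_map, List.filter_filter, Function.comp]
  congr 1
  apply List.filter_congr
  intro j _
  by_cases h : PySem.Str.slice (PySem.List.pyGetD lst p "") (some 0) (some k)
      = PySem.Str.slice (PySem.List.pyGetD lst j "") (some (-k)) none
  · simp [h]
  · simp [h]
    exact fun _ hh => h hh.symm
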